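-- pv_equiv track=rewrite | github.com/zenthic22/RespaldoP2_MIA | utils/Fhandler.py | crear_diccionario_ruta
-- ===== SOURCE A (Python) =====
-- def crear_diccionario_ruta(lista_rutas):
--     arbol = {"/":{}}
--     for ruta in lista_rutas:
--         aux_dict = arbol["/"]
--         for palabra in ruta.split("/")[1:]:
--             if not aux_dict.get(palabra):
--                 aux_dict[palabra] = {}
--             aux_dict = aux_dict[palabra]
--
--     s="/\n"
--     s+=crear_arbol(arbol["/"],[])
--     return s
--
-- def crear_arbol(diccionario,indentacion):
--     s=""
--     i = 0
--     for k,v in diccionario.items():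
--         i+=1
--         for x in indentacion:
--             s+=x
--         s+="|_"+k+"\n"
--         if len(v) >0:
--             if i<len(diccionario):
--                 n_indentacion = indentacion[:]+["| "]
--             else:
--                 n_indentacion = indentacion[:]+["  "]
--             s+=crear_arbol(diccionario[k],n_indentacion)
--     return s
-- ===== SOURCE B (Python) =====
-- def crear_diccionario_ruta(lista_rutas):
--     raiz = {}
--     for ruta in lista_rutas:
--         _insertar(raiz, ruta.split("/")[1:])
--     out = ["/\n"]
--     pila = []
--     _empujar(pila, list(raiz.items()), "")
--     while pila:
--         k, v, li, ci = pila.pop()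
--         out.append(li + "|_" + k + "\n")
--         if v:
--             _empujar(pila, list(v.items()), ci)
--     return "".join(out)
--
-- def _insertar(nodo, comps):
--     if not comps:
--         return
--     c = comps[0]
--     sub = nodo.get(c)
--     if not sub:
--         sub = {}
--         nodo[c] = sub
--     _insertar(sub, comps[1:])
--
-- def _empujar(pila, items, ci):
--     n = len(items)
--     for j in range(n - 1, -1, -1):
--         k, v = items[j]
--         pila.append((k, v, ci, ci + ("| " if j < n - 1 else "  ")))
-- ===== Notes on version B (the rewrite author's own statement) =====
-- stated objective: alternative
-- what changed: The recursive crear_arbol renderer (re-walking the dict with an indentation list per level) is replaced by an explicit stack-based iterative DFS carrying (key, subtree, line_indent, child_indent) items with precomputed indentation strings, and the trie is built by a recursive per-path insert instead of the iterative dict walk.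
import Mathlib
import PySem

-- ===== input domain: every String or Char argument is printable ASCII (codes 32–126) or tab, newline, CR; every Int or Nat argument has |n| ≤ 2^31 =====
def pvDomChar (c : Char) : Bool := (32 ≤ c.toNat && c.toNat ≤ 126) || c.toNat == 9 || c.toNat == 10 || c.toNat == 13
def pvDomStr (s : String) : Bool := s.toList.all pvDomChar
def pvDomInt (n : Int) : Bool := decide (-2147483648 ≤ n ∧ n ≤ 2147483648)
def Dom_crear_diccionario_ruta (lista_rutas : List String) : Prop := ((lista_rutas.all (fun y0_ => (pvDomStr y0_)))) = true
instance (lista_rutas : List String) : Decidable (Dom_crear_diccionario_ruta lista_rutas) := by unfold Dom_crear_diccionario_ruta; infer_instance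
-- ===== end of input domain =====

-- B replaces the recursive tree renderer by an explicit stack-based iterative DFS with
-- precomputed indentation strings (objective: alternative decomposition, same cost).

-- The nested Python dicts form a trie; a trie node's children are an insertion-ordered
-- association list, encoded as its own spine: `nil` = {}, `cons key subtree rest`.
inductive Trie where
  | nil : Trie
  | cons : String → Trie → Trie → Trie
deriving DecidableEq, Repr

-- number of keys of a dict node (Python len(d))
def Trie.lenT : Trie → Nat
  | .nil => 0
  | .cons _ _ tl => 1 + tl.lenT

-- ===== PORT A =====
-- A's inner `for palabra …` walk: `if not aux_dict.get(palabra): aux_dict[palabra] = {}`,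
-- then descend; overwriting an existing (necessarily empty) value keeps its position.
mutual
def insA : Trie → List String → Trie
  | d, [] => d
  | d, p :: rest => stepA d p rest
termination_by _ c => (c.length, 1, 0)
def stepA : Trie → String → List String → Trie
  | .nil, p, rest => .cons p (insA .nil rest) .nil
  | .cons k sub tl, p, rest =>
    if k = p then
      if sub = .nil then .cons k (insA .nil rest) tl else .cons k (insA sub rest) tl
    else .cons k sub (stepA tl p rest)
termination_by d _ rest => (rest.length + 1, 0, sizeOf d)
end

-- crear_arbol: renderAuxA is the `for k,v in diccionario.items()` loop carrying the
-- counter i and len(diccionario); renderA computes len and starts the loop.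
mutual
def renderA : Trie → List String → String
  | d, ind => renderAuxA d ind 0 d.lenT
termination_by d _ => (sizeOf d, 1)
def renderAuxA : Trie → List String → Nat → Nat → String
  | .nil, _, _, _ => ""
  | .cons k sub tl, ind, i, total =>
    (ind.foldl (· ++ ·) "") ++ "|_" ++ k ++ "\n" ++
    (if sub.lenT > 0 then
      (if i + 1 < total then renderA sub (ind ++ ["| "]) else renderA sub (ind ++ ["  "]))
     else "") ++
    renderAuxA tl ind (i + 1) total
termination_by d _ _ _ => (sizeOf d, 0)
end

def crear_diccionario_ruta (lista_rutas : List String) : String :=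
  -- arbol = {"/": {}}: only arbol["/"] is ever used; it is the Trie below
  let arbol := lista_rutas.foldl (fun d ruta => insA d (((PySem.Chars.splitOn ruta.toList ['/']).map String.ofList).drop 1)) .nil
  "/\n" ++ renderA arbol []

-- ===== PORT B =====
-- _insertar: nodo.get(c) (missing and falsy-{} both descend into {}), rebuilt functionally:
def getOrB : Trie → String → Trie
  | .nil, _ => .nil
  | .cons k sub tl, c => if k = c then sub else getOrB tl c

def setKeyB : Trie → String → Trie → Trie
  | .nil, c, v => .cons c v .nil
  | .cons k sub tl, c, v => if k = c then .cons k v tl else .cons k sub (setKeyB tl c v)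

def insB : Trie → List String → Trie
  | d, [] => d
  | d, c :: rest => setKeyB d c (insB (getOrB d c) rest)

-- _empujar: the items pushed (in reverse) then popped are consumed in this order;
-- the stack is a list with its head on top, so pushing reversed items = prepending this list.
def itemsB : Trie → String → List (String × Trie × String × String)
  | .nil, _ => []
  | .cons k sub .nil, ci => [(k, sub, ci, ci ++ "  ")]
  | .cons k sub tl, ci => (k, sub, ci, ci ++ "| ") :: itemsB tl ci

-- explicit size of a trie, for termination of the while loop
def Trie.sz : Trie → Nat
  | .nil => 1
  | .cons _ sub tl => 1 + sub.sz + tl.sz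

-- total size of the subtrees still on the stack, for termination of the while loop
def stackMeas (st : List (String × Trie × String × String)) : Nat :=
  (st.map (fun it => it.2.1.sz)).sum

theorem itemsB_meas_lt (sub : Trie) (ci : String) :
    stackMeas (itemsB sub ci) < sub.sz := by
  induction sub generalizing ci with
  | nil => simp [itemsB, stackMeas, Trie.sz]
  | cons k s tl ih1 ih2 =>
    cases tl with
    | nil => simp [itemsB, stackMeas, Trie.sz]
    | cons k2 s2 tl2 =>
      have h1 := ih2 ci
      simp only [itemsB, stackMeas, List.map_cons, List.sum_cons, Trie.sz] at *
      omega

-- the `while pila:` loop (out accumulates by appending; equal to this concatenation)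
def runStackB : List (String × Trie × String × String) → String
  | [] => ""
  | (k, sub, li, ci) :: st =>
    li ++ "|_" ++ k ++ "\n" ++
    runStackB (if sub = .nil then st else itemsB sub ci ++ st)
termination_by st => stackMeas st
decreasing_by
  simp only [stackMeas, List.map_cons, List.sum_cons]
  split
  · next h =>
      have : 1 ≤ sub.sz := by subst h; simp [Trie.sz]
      omega
  · simp only [List.map_append, List.sum_append]
    have := itemsB_meas_lt sub ci
    simp only [stackMeas] at this
    omega

def crear_diccionario_ruta_alt (lista_rutas : List String) : String :=
  let raiz := lista_rutas.foldl (fun d ruta => insB d (((PySem.Chars.splitOn ruta.toList ['/']).map String.ofList).drop 1)) .nil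
  "/\n" ++ runStackB (itemsB raiz "")

-- ===== PRECONDITION & SPEC =====
def Spec_crear_diccionario_ruta (lista_rutas : List String) (out : String) : Prop := out = crear_diccionario_ruta_alt lista_rutas
instance (lista_rutas : List String) (out : String) : Decidable (Spec_crear_diccionario_ruta lista_rutas out) := by unfold Spec_crear_diccionario_ruta; infer_instance

-- ===== CLAIM (what is proved, stated in full; the proofs are below) =====
def Claim_equal_crear_diccionario_ruta : Prop := ∀ (lista_rutas : List String), Dom_crear_diccionario_ruta lista_rutas → Spec_crear_diccionario_ruta lista_rutas (crear_diccionario_ruta lista_rutas)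

-- ===== LEMMAS AND PROOFS =====

-- the two insertion routines agree
theorem ins_eq (comps : List String) : ∀ d : Trie, insA d comps = insB d comps := by
  induction comps with
  | nil => intro d; simp [insA, insB]
  | cons p rest ih =>
    have step : ∀ d : Trie, stepA d p rest = setKeyB d p (insB (getOrB d p) rest) := by
      intro d
      induction d with
      | nil => simp [stepA, setKeyB, getOrB, ih]
      | cons k sub tl ih1 ih2 =>
        by_cases hk : k = p
        · subst hk
          cases hsub : sub with
          | nil => simp [stepA, setKeyB, getOrB, ih]
          | cons a b c => simp [stepA, setKeyB, getOrB, ih]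
        · simp [stepA, setKeyB, getOrB, hk, ih2]
    intro d
    simp [insA, insB, step d]

theorem strConcat_snoc (ind : List String) (x : String) :
    (ind ++ [x]).foldl (· ++ ·) "" = (ind.foldl (· ++ ·) "") ++ x := by
  simp [List.foldl_append]

theorem runStackB_collapse (sub : Trie) (ci : String)
    (st : List (String × Trie × String × String)) :
    runStackB (if sub = .nil then st else itemsB sub ci ++ st)
      = runStackB (itemsB sub ci ++ st) := by
  split
  · rename_i h; subst h; simp [itemsB]
  · rfl

-- (if len(v) > 0 …) collapses: rendering an empty dict yields "" anyway
theorem renderAuxA_opt (sub : Trie) (ind : List String) :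
    (if sub.lenT > 0 then renderA sub ind else "") = renderAuxA sub ind 0 sub.lenT := by
  cases sub with
  | nil => simp [Trie.lenT, renderAuxA]
  | cons a b c =>
    rw [if_pos (by simp [Trie.lenT] : Trie.lenT (Trie.cons a b c) > 0)]
    rw [renderA]

-- the stack loop computes the recursive rendering, item block by item block
theorem run_items (d : Trie) : ∀ (ind : List String) (i : Nat)
    (st : List (String × Trie × String × String)),
    runStackB (itemsB d (ind.foldl (· ++ ·) "") ++ st)
      = renderAuxA d ind i (i + d.lenT) ++ runStackB st := by
  induction d with
  | nil => intro ind i st; simp [itemsB, renderAuxA]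
  | cons k sub tl ih_sub ih_tl =>
    intro ind i st
    cases htl : tl with
    | nil =>
      -- last sibling: child indent "  ", and i + 1 < total is false
      have hlt : ¬ (i + 1 < i + Trie.lenT (Trie.cons k sub Trie.nil)) := by
        simp [Trie.lenT]
      conv_lhs => simp only [itemsB, List.cons_append, List.nil_append]
      rw [runStackB, runStackB_collapse, ← strConcat_snoc ind "  ",
        ih_sub (ind ++ ["  "]) 0 st, Nat.zero_add, ← renderAuxA_opt sub (ind ++ ["  "])]
      conv_rhs => rw [renderAuxA]
      rw [if_neg hlt]
      simp [renderAuxA, String.append_assoc]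
    | cons k2 sub2 tl2 =>
      rw [htl] at ih_tl
      have hlt : i + 1 < i + Trie.lenT (Trie.cons k sub (Trie.cons k2 sub2 tl2)) := by
        simp [Trie.lenT]
      have htot : i + Trie.lenT (Trie.cons k sub (Trie.cons k2 sub2 tl2))
          = (i + 1) + Trie.lenT (Trie.cons k2 sub2 tl2) := by
        simp [Trie.lenT]; omega
      conv_lhs => simp only [itemsB, List.cons_append, List.append_assoc]
      rw [runStackB, runStackB_collapse, ← strConcat_snoc ind "| ",
        ih_sub (ind ++ ["| "]) 0 _, ih_tl ind (i + 1) st, Nat.zero_add,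
        ← renderAuxA_opt sub (ind ++ ["| "])]
      conv_rhs => rw [renderAuxA]
      rw [if_pos hlt, htot]
      simp [String.append_assoc]

theorem render_eq (d : Trie) : runStackB (itemsB d "") = renderA d [] := by
  have h := run_items d [] 0 []
  simpa [renderA, runStackB] using h

-- ===== VERDICT (by name: the statement is the Claim_ definition above) =====
theorem crear_diccionario_ruta_spec : Claim_equal_crear_diccionario_ruta := by
  intro lista_rutas _
  unfold Spec_crear_diccionario_ruta crear_diccionario_ruta crear_diccionario_ruta_alt
  have hfold : lista_rutas.foldl (fun d ruta => insA d (((PySem.Chars.splitOn ruta.toList ['/']).map String.ofList).drop 1)) .nil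
      = lista_rutas.foldl (fun d ruta => insB d (((PySem.Chars.splitOn ruta.toList ['/']).map String.ofList).drop 1)) .nil := by
    have : (fun (d : Trie) (ruta : String) => insA d (((PySem.Chars.splitOn ruta.toList ['/']).map String.ofList).drop 1))
        = (fun (d : Trie) (ruta : String) => insB d (((PySem.Chars.splitOn ruta.toList ['/']).map String.ofList).drop 1)) := by
      funext d ruta; exact ins_eq _ d
    rw [this]
  show "/\n" ++ renderA (lista_rutas.foldl (fun d ruta => insA d (((PySem.Chars.splitOn ruta.toList ['/']).map String.ofList).drop 1)) .nil) []
      = "/\n" ++ runStackB (itemsB (lista_rutas.foldl (fun d ruta => insB d (((PySem.Chars.splitOn ruta.toList ['/']).map String.ofList).drop 1)) .nil) "")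
  rw [← hfold, render_eq]
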